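-- pv_equiv track=rewrite | github.com/sononicola/Continuous-Beam-Solver | continuous_beam_solver/span_beam.py | combinations_generic
-- ===== SOURCE A (Python) =====
-- def combinations_generic(
--     q_max_list: list, q_min_list: list, nCampate: int
-- ) -> list[list]:
--     # for testing:
--     # q_max_list = ["S1", "S2", "S3", "S4", "S5", "S6"]
--     # q_min_list = ["F1", "F2", "F3", "F4", "F5", "F6"]
--     # nCampate = 6
--
--     # S S S S S S ...
--     comb_0 = q_max_list
--     # S F S F S F ...
--     comb_1 = [q_max_list[i] if i % 2 == 0 else q_min_list[i] for i in range(nCampate)]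
--     # F S F S F S...
--     comb_2 = [q_max_list[i] if i % 2 == 1 else q_min_list[i] for i in range(nCampate)]
--
--     """
--         S S F S F S...
--         F S S F S F...
--         S F S S F S...
--
--         comb_j is a couple of [ S[j] , S[j+1] ] at j index. Then is added the left side and the right side to it.
--         if j = 1: ['F1', 'S2', 'S3', 'F4', 'S5', 'F6']
--         if j = 2: ['S1', 'F2', 'S3', 'S4', 'F5', 'S6']
--         """
--     combs_SS: list[list] = []
--
--     for j in range(0, nCampate - 1):
--         comb_j = [q_max_list[j], q_max_list[j + 1]]
--         if j % 2 == 0: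
--             comb_right = [
--                 q_max_list[i] if i % 2 == 1 else q_min_list[i]
--                 for i in range(j + 2, nCampate)
--             ]
--             comb_left = [
--                 q_max_list[i] if i % 2 == 0 else q_min_list[i] for i in range(0, j)
--             ]
--         else:
--             comb_right = [
--                 q_max_list[i] if i % 2 == 0 else q_min_list[i]
--                 for i in range(j + 2, nCampate)
--             ]
--             comb_left = [
--                 q_max_list[i] if i % 2 == 1 else q_min_list[i] for i in range(0, j)
--             ]
--
--         comb_left.extend(comb_j)
--         comb_left.extend(comb_right)
--         combs_SS.append(comb_left)
--
--     # Add all combinations in a list of lists: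
--     combs: list[list] = [comb_0, comb_1, comb_2]
--     combs.extend(combs_SS)
--
--     return combs
-- ===== SOURCE B (Python) =====
-- def combinations_generic(
--     q_max_list: list, q_min_list: list, nCampate: int
-- ) -> list[list]:
--     # Every row except the first is q_max where a selector holds, q_min elsewhere.
--     def pick(sel):
--         return [q_max_list[i] if sel(i) else q_min_list[i] for i in range(nCampate)]
--
--     # alternating rows, then one selector per double-S row j: element i is a max
--     # iff its parity matches j's on the prefix i <= j and (j+1)'s after it.
--     selectors = [lambda i: i % 2 == 0, lambda i: i % 2 == 1]
--     selectors += [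
--         (lambda j: lambda i: i % 2 == (j % 2 if i <= j else (j + 1) % 2))(j)
--         for j in range(nCampate - 1)
--     ]
--     return [q_max_list] + [pick(s) for s in selectors]
-- ===== Notes on version B (the rewrite author's own statement) =====
-- stated objective: simpler
-- what changed: B replaces A's per-j branch on parity and three-segment assembly (left + pair + right) with a uniform selector-based generator: each row after the first is one comprehension picking q_max[i] exactly where a single closed-form parity condition holds, so no segments, no parity branch and no list extension remain.
import Mathlib
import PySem

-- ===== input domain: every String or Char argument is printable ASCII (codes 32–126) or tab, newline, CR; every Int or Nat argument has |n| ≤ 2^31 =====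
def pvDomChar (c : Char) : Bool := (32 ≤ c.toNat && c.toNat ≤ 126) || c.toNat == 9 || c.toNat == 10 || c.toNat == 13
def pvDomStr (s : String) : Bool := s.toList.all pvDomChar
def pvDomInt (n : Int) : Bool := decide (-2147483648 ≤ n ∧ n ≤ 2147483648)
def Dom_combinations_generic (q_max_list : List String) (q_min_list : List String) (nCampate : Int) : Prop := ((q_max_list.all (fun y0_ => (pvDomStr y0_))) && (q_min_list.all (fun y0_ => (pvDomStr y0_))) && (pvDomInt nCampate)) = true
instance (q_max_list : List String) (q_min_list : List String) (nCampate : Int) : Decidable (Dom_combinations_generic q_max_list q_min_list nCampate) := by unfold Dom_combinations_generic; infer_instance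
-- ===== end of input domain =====

-- B generates every row after the first from a single closed-form parity selector
-- (one comprehension per row), replacing A's per-j parity branch and
-- left/pair/right segment assembly (objective: simpler).

-- ===== PORT A =====
def combinations_generic (q_max_list : List String) (q_min_list : List String) (nCampate : Int) : List (List String) :=
  let comb_0 := q_max_list
  let comb_1 := (PySem.List.pyRange 0 nCampate 1).map (fun i =>
    if i % 2 == 0 then PySem.List.pyGetD q_max_list i "" else PySem.List.pyGetD q_min_list i "")
  let comb_2 := (PySem.List.pyRange 0 nCampate 1).map (fun i =>
    if i % 2 == 1 then PySem.List.pyGetD q_max_list i "" else PySem.List.pyGetD q_min_list i "")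
  let combs_SS := (PySem.List.pyRange 0 (nCampate - 1) 1).foldl (fun acc j =>
    let comb_j := [PySem.List.pyGetD q_max_list j "", PySem.List.pyGetD q_max_list (j + 1) ""]
    let comb_right :=
      if j % 2 == 0 then
        (PySem.List.pyRange (j + 2) nCampate 1).map (fun i =>
          if i % 2 == 1 then PySem.List.pyGetD q_max_list i "" else PySem.List.pyGetD q_min_list i "")
      else
        (PySem.List.pyRange (j + 2) nCampate 1).map (fun i =>
          if i % 2 == 0 then PySem.List.pyGetD q_max_list i "" else PySem.List.pyGetD q_min_list i "")
    let comb_left :=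
      if j % 2 == 0 then
        (PySem.List.pyRange 0 j 1).map (fun i =>
          if i % 2 == 0 then PySem.List.pyGetD q_max_list i "" else PySem.List.pyGetD q_min_list i "")
      else
        (PySem.List.pyRange 0 j 1).map (fun i =>
          if i % 2 == 1 then PySem.List.pyGetD q_max_list i "" else PySem.List.pyGetD q_min_list i "")
    acc ++ [comb_left ++ comb_j ++ comb_right]) []
  [comb_0, comb_1, comb_2] ++ combs_SS

-- ===== PORT B =====
def combinations_generic_alt (q_max_list : List String) (q_min_list : List String) (nCampate : Int) : List (List String) :=
  let pick : (Int → Bool) → List String := fun sel =>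
    (PySem.List.pyRange 0 nCampate 1).map (fun i =>
      if sel i then PySem.List.pyGetD q_max_list i "" else PySem.List.pyGetD q_min_list i "")
  let selectors : List (Int → Bool) :=
    [fun i => i % 2 == 0, fun i => i % 2 == 1] ++
    (PySem.List.pyRange 0 (nCampate - 1) 1).map (fun j =>
      fun i => i % 2 == (if i ≤ j then j % 2 else (j + 1) % 2))
  [q_max_list] ++ selectors.map pick

-- ===== PRECONDITION & SPEC =====
-- Pre_ excludes exactly the inputs on which A raises IndexError: nCampate > 0 with
-- nCampate exceeding the length of either list (both programs raise there).
def Pre_combinations_generic (q_max_list : List String) (q_min_list : List String) (nCampate : Int) : Prop :=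
  nCampate ≤ 0 ∨ (nCampate ≤ q_max_list.length ∧ nCampate ≤ q_min_list.length)
instance (q_max_list : List String) (q_min_list : List String) (nCampate : Int) : Decidable (Pre_combinations_generic q_max_list q_min_list nCampate) := by unfold Pre_combinations_generic; infer_instance

def pvWitness_combinations_generic : List String × List String × Int := (["S1", "S2", "S3"], ["F1", "F2", "F3"], 3)

def Spec_combinations_generic (q_max_list : List String) (q_min_list : List String) (nCampate : Int) (out : List (List String)) : Prop := out = combinations_generic_alt q_max_list q_min_list nCampate
instance (q_max_list : List String) (q_min_list : List String) (nCampate : Int) (out : List (List String)) : Decidable (Spec_combinations_generic q_max_list q_min_list nCampate out) := by unfold Spec_combinations_generic; infer_instance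

-- ===== CLAIM =====
def Claim_equal_combinations_generic : Prop := ∀ (q_max_list : List String) (q_min_list : List String) (nCampate : Int), Dom_combinations_generic q_max_list q_min_list nCampate → Pre_combinations_generic q_max_list q_min_list nCampate → Spec_combinations_generic q_max_list q_min_list nCampate (combinations_generic q_max_list q_min_list nCampate)

-- ===== LEMMAS AND PROOFS =====

-- ===== VERDICT =====
theorem combinations_generic_spec : Claim_equal_combinations_generic := by
  intro qmax qmin n _ hpre
  unfold Spec_combinations_generic combinations_generic combinations_generic_alt
  simp only [PySem.List.foldl_append_singleton_eq_map, List.map_cons,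
    List.nil_append, List.cons_append, List.map_map]
  refine congrArg _ (congrArg _ (congrArg _ ?_))
  apply List.map_congr_left
  intro j hj
  rw [PySem.List.mem_pyRange_one] at hj
  obtain ⟨hj0, hjn⟩ := hj
  -- split B's full-range comprehension at j and j+2
  rw [PySem.List.pyRange_one_append 0 (j + 2) n (by omega) (by omega),
      PySem.List.pyRange_one_append 0 j (j + 2) (by omega) (by omega),
      PySem.List.pyRange_one_cons (show j < j + 2 by omega),
      PySem.List.pyRange_one_cons (show j + 1 < j + 2 by omega),
      PySem.List.pyRange_one_eq_nil (show j + 2 ≤ j + 1 + 1 by omega)]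
  simp only [Function.comp, List.map_append, List.map_cons, List.map_nil,
    List.append_assoc, List.cons_append, List.nil_append]
  have hmid1 : ((if (j : Int) ≤ j then j % 2 else (j + 1) % 2)) = j % 2 := if_pos le_rfl
  have hmid2 : ((if (j + 1 : Int) ≤ j then j % 2 else (j + 1) % 2)) = (j + 1) % 2 :=
    if_neg (by omega)
  cases hpar : (j % 2 == 0 : Bool) with
  | false =>
    have hj2 : j % 2 = 1 := by
      have := (beq_iff_eq (a := j % 2) (b := (0 : Int))).not.mp (by simp [hpar])
      omega
    simp only [Bool.false_eq_true, reduceIte]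
    congr 1
    · apply List.map_congr_left
      intro i hi
      rw [PySem.List.mem_pyRange_one] at hi
      have hc : (if i ≤ j then j % 2 else (j + 1) % 2) = (1 : Int) := by
        rw [if_pos (by omega : i ≤ j)]; omega
      simp only [hc]
    · congr 1
      · simp only [hmid1]; simp
      · congr 1
        · simp only [hmid2]; simp
        · apply List.map_congr_left
          intro i hi
          rw [PySem.List.mem_pyRange_one] at hi
          have hc : (if i ≤ j then j % 2 else (j + 1) % 2) = (0 : Int) := by
            rw [if_neg (by omega : ¬ i ≤ j)]; omega
          simp only [hc]
  | true =>
    have hj2 : j % 2 = 0 := by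
      have := (beq_iff_eq (a := j % 2) (b := (0 : Int))).mp hpar
      omega
    simp only [reduceIte]
    congr 1
    · apply List.map_congr_left
      intro i hi
      rw [PySem.List.mem_pyRange_one] at hi
      have hc : (if i ≤ j then j % 2 else (j + 1) % 2) = (0 : Int) := by
        rw [if_pos (by omega : i ≤ j)]; omega
      simp only [hc]
    · congr 1
      · simp only [hmid1]; simp
      · congr 1
        · simp only [hmid2]; simp
        · apply List.map_congr_left
          intro i hi
          rw [PySem.List.mem_pyRange_one] at hi
          have hc : (if i ≤ j then j % 2 else (j + 1) % 2) = (1 : Int) := by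
            rw [if_neg (by omega : ¬ i ≤ j)]; omega
          simp only [hc]
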